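-- pv_equiv track=rewrite | github.com/prernaa/TwitterOPINE | pyfiles/rulesSVM.py | findIncase
-- ===== SOURCE A (Python) =====
-- def removeRepeats(raw):
--     Lcase = raw.lower()
--     new = Lcase[0]
--     numrepeat = 0
--     for ei in range(0, len(Lcase)-1):
--         prev = Lcase[ei]
--         curr = Lcase[ei+1]
--         if prev!=curr:
--             new=new+curr
--         else:
--             numrepeat=numrepeat+1
--     return new
--
-- def findIncase(tokens):
--     incaselocs= []
--     for ti2 in range(1, len(tokens)):
--         ti1 = ti2-1
--         t1 = tokens[ti1]
--         t2 = tokens[ti2]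
--         normt1 = removeRepeats(t1)
--         normt2 = removeRepeats(t2)
--         if (normt1=="in" and normt2=="case") or (normt1=="in_neg" and normt2=="case_neg"):
--             incaselocs.append(ti1)
--     return incaselocs
-- ===== SOURCE B (Python) =====
-- def _matches(tok, pat):
--     # two-pointer match: does tok, lowercased and with runs collapsed, equal pat?
--     s = tok.lower()
--     if not s or s[0] != pat[0]:
--         return False
--     j = 0
--     for c in s[1:]:
--         if c == pat[j]:
--             continue
--         if j + 1 < len(pat) and c == pat[j + 1]:
--             j += 1
--         else:
--             return False
--     return j == len(pat) - 1
--
-- def findIncase(tokens):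
--     return [i for i, (t1, t2) in enumerate(zip(tokens, tokens[1:]))
--             if (_matches(t1, "in") and _matches(t2, "case"))
--             or (_matches(t1, "in_neg") and _matches(t2, "case_neg"))]
-- ===== Notes on version B (the rewrite author's own statement) =====
-- stated objective: faster
-- what changed: B never builds any normalized string: it runs a two-pointer pattern matcher that walks each token once against the literal pattern ('in', 'case', ...), advancing the pattern pointer on a run break and bailing out at the first mismatch, instead of A's constructing a repeat-collapsed copy of every token (twice per interior token) and comparing it to the targets.
import Mathlib
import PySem

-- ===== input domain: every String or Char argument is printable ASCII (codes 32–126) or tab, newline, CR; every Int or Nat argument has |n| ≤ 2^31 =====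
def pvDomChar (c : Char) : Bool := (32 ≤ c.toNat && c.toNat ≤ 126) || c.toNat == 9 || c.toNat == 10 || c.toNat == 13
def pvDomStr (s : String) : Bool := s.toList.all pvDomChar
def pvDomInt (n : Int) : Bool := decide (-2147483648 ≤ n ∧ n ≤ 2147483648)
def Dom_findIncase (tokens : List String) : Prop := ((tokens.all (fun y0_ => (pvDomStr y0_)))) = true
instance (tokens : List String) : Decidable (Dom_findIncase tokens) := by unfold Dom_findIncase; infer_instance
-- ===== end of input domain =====

-- B replaces A's "build a repeat-collapsed copy of each token and compare it to the targets"
-- with a two-pointer pattern matcher that walks the raw token once against each literal pattern,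
-- never allocating a normalized string (alternative algorithm, same asymptotic cost).
-- Pre_ excludes only inputs on which Python A raises (IndexError on an empty token in a
-- list of length >= 2).


-- ===== PORT A =====
def removeRepeats (raw : String) : String :=
  let lcase := (PySem.Str.lower raw).toList
  let st := (PySem.List.pyRange 0 ((lcase.length : Int) - 1) 1).foldl
    (fun (st : List Char × Int) ei =>
      let prev := PySem.List.pyGetD lcase ei ' '
      let curr := PySem.List.pyGetD lcase (ei + 1) ' '
      if prev ≠ curr then (st.1 ++ [curr], st.2) else (st.1, st.2 + 1))
    ([PySem.List.pyGetD lcase 0 ' '], (0 : Int))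
  String.ofList st.1

def findIncase (tokens : List String) : List Int :=
  (PySem.List.pyRange 1 (tokens.length : Int) 1).foldl
    (fun (acc : List Int) ti2 =>
      let ti1 := ti2 - 1
      let t1 := PySem.List.pyGetD tokens ti1 ""
      let t2 := PySem.List.pyGetD tokens ti2 ""
      let normt1 := removeRepeats t1
      let normt2 := removeRepeats t2
      if (normt1 = "in" ∧ normt2 = "case") ∨ (normt1 = "in_neg" ∧ normt2 = "case_neg")
      then acc ++ [ti1] else acc)
    []

-- ===== PORT B =====
-- the 'for c in s[1:]' loop of _matches; j indexes pat (always in range in Source B, default ' ')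
def pvMatchLoop (pat : List Char) : Nat → List Char → Bool
  | j, [] => j == pat.length - 1
  | j, c :: r =>
      if c = pat.getD j ' ' then pvMatchLoop pat j r
      else if j + 1 < pat.length ∧ c = pat.getD (j + 1) ' ' then pvMatchLoop pat (j + 1) r
      else false

def pvMatchesL (s : List Char) (pat : List Char) : Bool :=
  match s with
  | [] => false
  | c :: rest => if c = pat.getD 0 ' ' then pvMatchLoop pat 0 rest else false

def pvMatches (tok : String) (pat : List Char) : Bool :=
  pvMatchesL (PySem.Str.lower tok).toList pat

def findIncase_alt (tokens : List String) : List Int :=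
  (PySem.List.enumerate (tokens.zip (PySem.List.slice tokens (some 1) none))).filterMap
    (fun p =>
      if (pvMatches p.2.1 ['i','n'] = true ∧ pvMatches p.2.2 ['c','a','s','e'] = true) ∨
         (pvMatches p.2.1 ['i','n','_','n','e','g'] = true ∧
          pvMatches p.2.2 ['c','a','s','e','_','n','e','g'] = true)
      then some p.1 else none)

-- ===== PRECONDITION & SPEC =====
-- Pre_ excludes only the inputs on which Python A raises: a list of 2 or more tokens containing
-- an empty token makes removeRepeats evaluate Lcase[0] on "" (IndexError); B returns there.
def Pre_findIncase (tokens : List String) : Prop :=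
  tokens.length < 2 ∨ ∀ t ∈ tokens, t ≠ ""
instance (tokens : List String) : Decidable (Pre_findIncase tokens) := by
  unfold Pre_findIncase; infer_instance

def pvWitness_findIncase : List String := ["in", "case", "x"]

def Spec_findIncase (tokens : List String) (out : List Int) : Prop := out = findIncase_alt tokens
instance (tokens : List String) (out : List Int) : Decidable (Spec_findIncase tokens out) := by unfold Spec_findIncase; infer_instance

-- ===== CLAIM (what is proved, stated in full; the proofs are below) =====
def Claim_equal_findIncase : Prop := ∀ (tokens : List String), Dom_findIncase tokens → Pre_findIncase tokens → Spec_findIncase tokens (findIncase tokens)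

-- ===== LEMMAS AND PROOFS =====

-- the repeat-collapsed remainder given the previous character
def rrList : Char → List Char → List Char
  | _, [] => []
  | c, d :: t => if c ≠ d then d :: rrList d t else rrList d t

theorem rrList_cons (p c : Char) (r : List Char) :
    rrList p (c :: r) = if p ≠ c then c :: rrList c r else rrList c r := rfl

theorem foldl_pair_append {α : Type} (l : List α) (p : α → Prop) [DecidablePred p]
    (f : α → Char) (init : List Char × Int) :
    (l.foldl (fun (st : List Char × Int) x =>
        if p x then (st.1 ++ [f x], st.2) else (st.1, st.2 + 1)) init).1
      = init.1 ++ l.flatMap (fun x => if p x then [f x] else []) := by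
  induction l generalizing init with
  | nil => simp
  | cons a l ih =>
      simp only [List.foldl_cons, List.flatMap_cons]
      by_cases h : p a <;> simp [h, ih, List.append_assoc]

theorem foldl_append_ite {α β : Type} (l : List α) (p : α → Prop) [DecidablePred p]
    (f : α → β) (init : List β) :
    l.foldl (fun acc x => if p x then acc ++ [f x] else acc) init
      = init ++ l.flatMap (fun x => if p x then [f x] else []) := by
  induction l generalizing init with
  | nil => simp
  | cons a l ih =>
      simp only [List.foldl_cons, List.flatMap_cons]
      by_cases h : p a <;> simp [h, ih, List.append_assoc]

theorem flatMap_eq_filterMap {α β : Type} (l : List α) (p : α → Prop) [DecidablePred p]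
    (f : α → β) :
    l.flatMap (fun x => if p x then [f x] else [])
      = l.filterMap (fun x => if p x then some (f x) else none) := by
  induction l with
  | nil => rfl
  | cons a l ih =>
      simp only [List.flatMap_cons, List.filterMap_cons]
      by_cases h : p a <;> simp [h, ih]

theorem flatMap_range_rr (t : List Char) (c : Char) :
    (List.range t.length).flatMap (fun k =>
        if (c :: t).getD k ' ' ≠ (c :: t).getD (k + 1) ' '
        then [(c :: t).getD (k + 1) ' '] else [])
      = rrList c t := by
  induction t generalizing c with
  | nil => simp [rrList]
  | cons d t ih =>
      rw [List.length_cons, List.range_succ_eq_map]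
      simp only [List.flatMap_cons, List.flatMap_map, List.getD_cons_zero, List.getD_cons_succ,
        Nat.succ_eq_add_one, rrList]
      by_cases h : c ≠ d <;> simp [h] <;> simpa using ih d

theorem removeRepeats_eq_rr (raw : String) (c : Char) (t : List Char)
    (h : (PySem.Str.lower raw).toList = c :: t) :
    removeRepeats raw = String.ofList (c :: rrList c t) := by
  unfold removeRepeats
  rw [h]
  simp only [List.length_cons, PySem.List.pyGetD_zero_cons]
  have hlen : ((t.length + 1 : Nat) : Int) - 1 = ((t.length : Nat) : Int) := by push_cast; ring
  rw [hlen, PySem.List.pyRange_zero_natCast, List.foldl_map]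
  have hbody : ∀ (st : List Char × Int) (k : Nat),
      (if PySem.List.pyGetD (c :: t) (k : Int) ' ' ≠ PySem.List.pyGetD (c :: t) ((k : Int) + 1) ' '
        then (st.1 ++ [PySem.List.pyGetD (c :: t) ((k : Int) + 1) ' '], st.2)
        else (st.1, st.2 + 1))
      = (if (c :: t).getD k ' ' ≠ (c :: t).getD (k + 1) ' '
        then (st.1 ++ [(c :: t).getD (k + 1) ' '], st.2)
        else (st.1, st.2 + 1)) := by
    intro st k
    have h1 : ((k : Int) + 1) = ((k + 1 : Nat) : Int) := by push_cast; ring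
    rw [h1, PySem.List.pyGetD_natCast, PySem.List.pyGetD_natCast]
  rw [PySem.List.foldl_congr_mem' _ _ _ _ (fun k _ st => hbody st k)]
  rw [foldl_pair_append (List.range t.length)
        (fun k => (c :: t).getD k ' ' ≠ (c :: t).getD (k + 1) ' ')
        (fun k => (c :: t).getD (k + 1) ' ')]
  rw [flatMap_range_rr]
  rfl

theorem matchLoop_eq (pat : List Char) (r : List Char) :
    ∀ (j : Nat), j < pat.length →
    pvMatchLoop pat j r = decide (rrList (pat.getD j ' ') r = pat.drop (j + 1)) := by
  induction r with
  | nil =>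
      intro j hj
      have hiff : ((rrList (pat.getD j ' ') [] = pat.drop (j + 1))) ↔ (j = pat.length - 1) := by
        simp only [rrList, eq_comm (a := ([] : List Char)), List.drop_eq_nil_iff]
        omega
      simp only [pvMatchLoop, hiff]
      rw [Bool.eq_iff_iff]
      simp
  | cons c r ih =>
      intro j hj
      simp only [pvMatchLoop]
      by_cases h1 : c = pat.getD j ' '
      · rw [if_pos h1, ih j hj]
        subst h1
        rw [rrList_cons, if_neg (by simp)]
      · rw [if_neg h1]
        have hrr : rrList (pat.getD j ' ') (c :: r) = c :: rrList c r := by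
          rw [rrList_cons, if_pos (fun he => h1 he.symm)]
        by_cases h2 : j + 1 < pat.length ∧ c = pat.getD (j + 1) ' '
        · obtain ⟨hj1, hc⟩ := h2
          rw [if_pos ⟨hj1, hc⟩, ih (j + 1) hj1, decide_eq_decide]
          have hg : pat.getD (j + 1) ' ' = pat[j+1] := List.getD_eq_getElem pat ' ' hj1
          rw [hg] at hc ⊢
          subst hc
          rw [hrr, List.drop_eq_getElem_cons hj1]
          exact ⟨fun hh => by rw [hh], fun hh => (List.cons_eq_cons.mp hh).2⟩
        · rw [if_neg h2]
          symm
          rw [decide_eq_false_iff_not]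
          intro heq
          rw [hrr] at heq
          by_cases hj1 : j + 1 < pat.length
          · have hdrop : pat.drop (j + 1) = pat[j+1] :: pat.drop (j + 1 + 1) :=
              List.drop_eq_getElem_cons hj1
            rw [hdrop] at heq
            have : c = pat[j+1] := (List.cons_eq_cons.mp heq).1
            exact h2 ⟨hj1, by rw [List.getD_eq_getElem pat ' ' hj1]; exact this⟩
          · have : pat.drop (j + 1) = [] := List.drop_eq_nil_iff.mpr (by omega)
            rw [this] at heq
            exact List.cons_ne_nil _ _ heq

theorem matches_eq (tok : String) (pat : List Char) (hp : 0 < pat.length)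
    (c : Char) (t : List Char) (h : (PySem.Str.lower tok).toList = c :: t) :
    pvMatches tok pat = decide (c :: rrList c t = pat) := by
  have hdrop : pat = pat[0] :: pat.drop 1 := by
    have h0 := List.drop_eq_getElem_cons (i := 0) (l := pat) hp
    rw [List.drop_zero] at h0
    exact h0
  have h0 : pat.getD 0 ' ' = pat[0] := List.getD_eq_getElem pat ' ' hp
  unfold pvMatches
  rw [h]
  simp only [pvMatchesL]
  by_cases hc : c = pat.getD 0 ' '
  · rw [if_pos hc, matchLoop_eq pat t 0 hp, decide_eq_decide]
    simp only [Nat.zero_add]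
    have hc' : c = pat[0] := h0 ▸ hc
    have hpat : pat = c :: pat.drop 1 := by rw [← hc'] at hdrop; exact hdrop
    rw [h0, ← hc']
    constructor
    · intro he
      rw [he]
      exact hpat.symm
    · intro he
      have h2 : c :: rrList c t = c :: pat.drop 1 := by rw [he]; exact hpat
      exact (List.cons_eq_cons.mp h2).2
  · rw [if_neg hc]
    symm
    rw [decide_eq_false_iff_not]
    intro heq
    rw [hdrop] at heq
    exact hc (h0 ▸ (List.cons_eq_cons.mp heq).1)

theorem lower_ne_nil (tok : String) (h : tok ≠ "") : (PySem.Str.lower tok).toList ≠ [] := by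
  rw [PySem.Str.toList_lower]
  simp only [PySem.Chars.lower, ne_eq, List.map_eq_nil_iff]
  intro hc
  exact h (String.toList_inj.mp (by simpa using hc))

theorem cond_eq (tok : String) (h : tok ≠ "") (pat : List Char) (hp : 0 < pat.length) :
    (pvMatches tok pat = true) ↔ (removeRepeats tok = String.ofList pat) := by
  obtain ⟨c, t, hct⟩ := List.exists_cons_of_ne_nil (lower_ne_nil tok h)
  rw [matches_eq tok pat hp c t hct, removeRepeats_eq_rr tok c t hct]
  simp only [decide_eq_true_eq]
  constructor
  · intro he; rw [he]
  · intro he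
    have := congrArg String.toList he
    simpa [String.toList_ofList] using this

theorem main (tokens : List String) (hpre : Pre_findIncase tokens) :
    findIncase tokens = findIncase_alt tokens := by
  unfold Pre_findIncase at hpre
  by_cases hlen : tokens.length < 2
  · have ha : findIncase tokens = [] := by
      unfold findIncase
      rw [PySem.List.pyRange_one_eq_nil (by exact_mod_cast Nat.lt_succ_iff.mp hlen)]
      rfl
    have hb : findIncase_alt tokens = [] := by
      rcases tokens with _ | ⟨a, rest⟩
      · rfl
      · rcases rest with _ | ⟨b, r⟩
        · unfold findIncase_alt
          rw [PySem.List.slice_from_one]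
          rfl
        · exfalso
          simp only [List.length_cons] at hlen
          omega
    rw [ha, hb]
  · have hall : ∀ t ∈ tokens, t ≠ "" := hpre.resolve_left hlen
    have hn : 2 ≤ tokens.length := Nat.le_of_not_lt hlen
    -- A side: reshape into a filterMap over List.range (length - 1)
    unfold findIncase
    rw [PySem.List.pyRange_one, List.foldl_map]
    have htn : ((tokens.length : Int) - 1).toNat = tokens.length - 1 := by omega
    rw [htn]
    have hbody : ∀ (acc : List Int) (k : Nat),
        (fun (acc : List Int) (ti2 : Int) =>
          if (removeRepeats (PySem.List.pyGetD tokens (ti2 - 1) "") = "in" ∧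
                removeRepeats (PySem.List.pyGetD tokens ti2 "") = "case") ∨
             (removeRepeats (PySem.List.pyGetD tokens (ti2 - 1) "") = "in_neg" ∧
                removeRepeats (PySem.List.pyGetD tokens ti2 "") = "case_neg")
          then acc ++ [ti2 - 1] else acc) acc (1 + (k : Int))
        = (if (removeRepeats (tokens.getD k "") = "in" ∧
                removeRepeats (tokens.getD (k + 1) "") = "case") ∨
             (removeRepeats (tokens.getD k "") = "in_neg" ∧
                removeRepeats (tokens.getD (k + 1) "") = "case_neg")
          then acc ++ [(k : Int)] else acc) := by
      intro acc k
      have h1 : (1 + (k : Int)) - 1 = ((k : Nat) : Int) := by omega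
      have h2 : (1 + (k : Int)) = ((k + 1 : Nat) : Int) := by push_cast; ring
      simp only [h2, PySem.List.pyGetD_natCast]
      norm_num [h1]
    rw [PySem.List.foldl_congr_mem' _ _ _ _ (fun k _ acc => hbody acc k)]
    rw [foldl_append_ite (List.range (tokens.length - 1))
        (fun k => (removeRepeats (tokens.getD k "") = "in" ∧
                removeRepeats (tokens.getD (k + 1) "") = "case") ∨
             (removeRepeats (tokens.getD k "") = "in_neg" ∧
                removeRepeats (tokens.getD (k + 1) "") = "case_neg"))
        (fun k => (k : Int)), flatMap_eq_filterMap, List.nil_append]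
    -- B side: reshape the enumerate/zip pipeline into a filterMap over the same range
    unfold findIncase_alt
    rw [PySem.List.slice_from_one]
    rw [PySem.List.enumerate_eq_map_pyRange _ ("", ""), List.filterMap_map]
    have hzlen : (tokens.zip tokens.tail).length = tokens.length - 1 := by
      rw [List.length_zip, List.length_tail]
      omega
    rw [show PySem.List.len (tokens.zip tokens.tail) = ((tokens.length - 1 : Nat) : Int) by
      simp [PySem.List.len, hzlen]]
    rw [PySem.List.pyRange_zero_natCast, List.filterMap_map]
    apply List.filterMap_congr
    intro k hk
    rw [List.mem_range] at hk
    have hk1 : k < tokens.length := by omega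
    have hk2 : k + 1 < tokens.length := by omega
    have hkz : k < (tokens.zip tokens.tail).length := by omega
    have hget : PySem.List.pyGetD (tokens.zip tokens.tail) (k : Int) ("", "")
        = (tokens[k], tokens[k + 1]) := by
      rw [PySem.List.pyGetD_natCast, List.getD_eq_getElem _ _ hkz, List.getElem_zip,
        List.getElem_tail]
    simp only [Function.comp, hget]
    have e1 : tokens.getD k "" = tokens[k] := List.getD_eq_getElem _ _ hk1
    have e2 : tokens.getD (k + 1) "" = tokens[k + 1] := List.getD_eq_getElem _ _ hk2
    have ne1 : tokens[k] ≠ "" := hall _ (List.getElem_mem hk1)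
    have ne2 : tokens[k + 1] ≠ "" := hall _ (List.getElem_mem hk2)
    have c1 := cond_eq tokens[k] ne1 ['i','n'] (by decide)
    have c2 := cond_eq tokens[k + 1] ne2 ['c','a','s','e'] (by decide)
    have c3 := cond_eq tokens[k] ne1 ['i','n','_','n','e','g'] (by decide)
    have c4 := cond_eq tokens[k + 1] ne2 ['c','a','s','e','_','n','e','g'] (by decide)
    rw [e1, e2]
    exact if_congr (by rw [c1, c2, c3, c4]) rfl rfl

-- ===== VERDICT (by name: the statement is the Claim_ definition above) =====
theorem findIncase_spec : Claim_equal_findIncase := by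
  intro tokens _ hpre
  unfold Spec_findIncase
  exact main tokens hpre
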